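-- pv_equiv track=rewrite | github.com/patronrpg/patronrpg.github.io | scripts/simple_character_generator.py | load_goals_neutral_big
-- ===== SOURCE A (Python) =====
-- def load_goals_neutral_big(data):
--     goals_neutral_big = []
--     goal_name = None
--     for line in data.splitlines():
--         if line.strip():
--             if goal_name is None:
--                 goal_name = line.strip()
--                 continue
--             goals_neutral_big.append((goal_name, line.strip()))
--             goal_name = None
--     return goals_neutral_big
-- ===== SOURCE B (Python) =====
-- def load_goals_neutral_big(data):
--     lines = [l.strip() for l in data.splitlines() if l.strip()]
--     it = iter(lines)
--     return list(zip(it, it))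
-- ===== Notes on version B (the rewrite author's own statement) =====
-- stated objective: idiomatic
-- what changed: Replaced the single-pass toggle state machine (goal_name carried across iterations) by a two-phase decomposition: first build the list of stripped non-blank lines, then pair consecutive elements with the zip(it, it) idiom, which drops an unpaired trailing line exactly as A does.
import Mathlib
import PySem

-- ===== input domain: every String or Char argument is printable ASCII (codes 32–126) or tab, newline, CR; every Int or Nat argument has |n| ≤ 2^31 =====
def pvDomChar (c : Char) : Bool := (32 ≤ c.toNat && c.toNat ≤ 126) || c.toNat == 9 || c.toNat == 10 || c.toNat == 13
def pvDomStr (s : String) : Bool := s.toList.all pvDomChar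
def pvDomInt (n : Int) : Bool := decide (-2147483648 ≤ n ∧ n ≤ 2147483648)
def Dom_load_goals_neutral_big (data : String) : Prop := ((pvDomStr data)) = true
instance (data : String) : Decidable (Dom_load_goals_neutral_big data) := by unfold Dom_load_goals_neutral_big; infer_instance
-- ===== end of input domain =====

-- B replaces A's single-pass toggle state machine by a two-phase decomposition
-- (filter the stripped non-blank lines, then pair consecutive elements); idiomatic, same cost.

-- ===== PORT A =====
-- A's loop: state = (accumulated pairs, pending goal name)
def pvLoopA : List String → List (String × String) → Option String → List (String × String)
  | [], acc, _ => acc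
  | line :: rest, acc, g? =>
    if PySem.Str.strip line ≠ "" then
      match g? with
      | none => pvLoopA rest acc (some (PySem.Str.strip line))
      | some g => pvLoopA rest (acc ++ [(g, PySem.Str.strip line)]) none
    else pvLoopA rest acc g?

def load_goals_neutral_big (data : String) : List (String × String) :=
  pvLoopA (PySem.Str.splitlines data) [] none

-- ===== PORT B =====
-- list(zip(it, it)) on one iterator = take consecutive elements two at a time
def pvPairUp : List String → List (String × String)
  | a :: b :: t => (a, b) :: pvPairUp t
  | _ => []

def load_goals_neutral_big_alt (data : String) : List (String × String) :=
  let lines := ((PySem.Str.splitlines data).map PySem.Str.strip).filter (fun l => l ≠ "")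
  pvPairUp lines

-- ===== PRECONDITION & SPEC =====
def Spec_load_goals_neutral_big (data : String) (out : List (String × String)) : Prop := out = load_goals_neutral_big_alt data
instance (data : String) (out : List (String × String)) : Decidable (Spec_load_goals_neutral_big data out) := by unfold Spec_load_goals_neutral_big; infer_instance

-- ===== CLAIM (what is proved, stated in full; the proofs are below) =====
def Claim_equal_load_goals_neutral_big : Prop := ∀ (data : String), Dom_load_goals_neutral_big data → Spec_load_goals_neutral_big data (load_goals_neutral_big data)

-- ===== LEMMAS AND PROOFS =====
-- Loop invariant: A's toggle fold from state (acc, g?) appends exactly the pairing of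
-- (pending name, if any) ++ the stripped non-blank lines still to come.
theorem pvLoopA_eq_pairUp (L : List String) :
    ∀ (acc : List (String × String)) (g? : Option String),
      pvLoopA L acc g? =
        acc ++ pvPairUp (g?.toList ++ (L.map PySem.Str.strip).filter (fun l => l ≠ "")) := by
  induction L with
  | nil =>
    intro acc g?
    cases g? <;> simp [pvLoopA, pvPairUp]
  | cons line rest ih =>
    intro acc g?
    by_cases h : PySem.Str.strip line = ""
    · cases g? <;> simp [pvLoopA, h, ih]
    · cases g? with
      | none => simp [pvLoopA, h, ih]
      | some g => simp [pvLoopA, h, ih, pvPairUp]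

-- ===== VERDICT (by name: the statement is the Claim_ definition above) =====
theorem load_goals_neutral_big_spec : Claim_equal_load_goals_neutral_big := by
  intro data _
  unfold Spec_load_goals_neutral_big load_goals_neutral_big load_goals_neutral_big_alt
  simpa using pvLoopA_eq_pairUp (PySem.Str.splitlines data) [] none
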